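-- pv_equiv track=rewrite | github.com/rakesh-050791/DS-Algo | Advance/Maths/GCD/26-September-2022.py | solve
-- ===== SOURCE A (Python) =====
-- def GCD(x,y):
--     if y==0:
--         return abs(x)
--     return GCD(y,x%y)
--
-- def solve(A):
--     N=len(A)
--     A.sort()
--     for i in range(N//2):# sorted in decreasing order for finding highest elements
--         A[i],A[N-1-i]=A[N-1-i],A[i]
--
--     ans=[]
--     di={} # di stores the count of A[i]'s that are to be deleted from the array
--     for i in range(N):
--         if A[i] in di and di[A[i]]>0:
--             di[A[i]]-=1
--
--         else:
--             for j in ans: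
--                 val=GCD(A[i],j)# first highest elemnts will get into ans array
--                 if val not in di:
--                     di[val]=2
--                     # we are adding 2 to the di as there will 2 pairs gcd(ans[j],A[i]) and gcd(A[i],ans[j])
--                 else:
--                     di[val]+=2
--             ans.append(A[i])
--
--     return ans
-- ===== SOURCE B (Python) =====
-- def GCD(x, y):
--     if y == 0:
--         return abs(x)
--     return GCD(y, x % y)
--
-- def solve(A):
--     # extract-max over a surviving-count table instead of A's index scan with a skip dict
--     A.sort(reverse=True)  # same in-place descending mutation as A
--     cnt = {}
--     for x in A:
--         cnt[x] = cnt.get(x, 0) + 1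
--     ans = []
--     while True:
--         pos = [v for v in cnt if cnt[v] > 0]
--         if not pos:
--             return ans
--         x = max(pos)
--         cnt[x] -= 1
--         for j in ans:
--             g = GCD(x, j)
--             cnt[g] = cnt.get(g, 0) - 2
--         ans.append(x)
-- ===== Notes on version B (the rewrite author's own statement) =====
-- stated objective: alternative
-- what changed: Replaces A's index-scan over the sorted array with a skip-count dict by an extract-max loop over a surviving-count table (Counter): repeatedly take the largest value with positive remaining count, charge its diagonal entry (-1) and each pairwise gcd with previously chosen answers (-2).
import Mathlib
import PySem

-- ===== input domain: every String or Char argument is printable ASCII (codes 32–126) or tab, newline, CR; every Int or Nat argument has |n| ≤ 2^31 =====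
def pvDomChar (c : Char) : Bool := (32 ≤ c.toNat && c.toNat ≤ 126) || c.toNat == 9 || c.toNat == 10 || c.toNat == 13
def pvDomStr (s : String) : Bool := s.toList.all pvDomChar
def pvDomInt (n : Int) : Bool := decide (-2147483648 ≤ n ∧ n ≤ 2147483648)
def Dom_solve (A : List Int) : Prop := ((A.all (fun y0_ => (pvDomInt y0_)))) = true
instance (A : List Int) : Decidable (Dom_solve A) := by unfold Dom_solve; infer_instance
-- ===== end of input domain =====

-- B replaces A's index-scan with a skip-count dict by an extract-max loop over a
-- surviving-count table; same complexity (objective: alternative algorithm).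
-- Both Pythons sort the argument list in place to descending order (identical mutation);
-- the equivalence proved here is about the return value.

-- ===== PORT A =====
-- Python's recursive GCD(x, y): if y==0: return abs(x); return GCD(y, x%y)
def pyGCD (x y : Int) : Int :=
  if h : y = 0 then |x|
  else pyGCD y (PySem.Int.mod x y)
termination_by y.natAbs
decreasing_by
  rcases lt_trichotomy y 0 with hy | hy | hy
  · have h2 := PySem.Int.mod_neg_bounds x hy
    omega
  · exact absurd hy h
  · have h1 := PySem.Int.mod_nonneg x hy
    have h2 := PySem.Int.mod_lt x hy
    omega

-- one iteration of A's reversing loop: A[i], A[N-1-i] = A[N-1-i], A[i]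
def swapStep (N : Int) (l : List Int) (i : Int) : List Int :=
  PySem.List.pySetD (PySem.List.pySetD l i (PySem.List.pyGetD l (N - 1 - i) 0))
    (N - 1 - i) (PySem.List.pyGetD l i 0)

-- A's main scan: for each element (descending), either consume a pending deletion
-- from di, or append it to ans and record 2 deletions for each gcd with prior answers
def solveLoop : List Int → List Int → PySem.Dict Int Int → List Int
  | [], ans, _ => ans
  | x :: rest, ans, di =>
    if di.contains x = true ∧ 0 < di.getD x 0 then
      solveLoop rest ans (di.insert x (di.getD x 0 - 1))
    else
      solveLoop rest (ans ++ [x])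
        (ans.foldl (fun d j =>
          if d.contains (pyGCD x j) = false then d.insert (pyGCD x j) 2
          else d.insert (pyGCD x j) (d.getD (pyGCD x j) 0 + 2)) di)

def solve (A : List Int) : List Int :=
  let N : Int := PySem.List.len A
  let As := PySem.List.sorted A (fun x => x)
  let Ad := (PySem.List.pyRange 0 (PySem.Int.floordiv N 2)).foldl (swapStep N) As
  solveLoop Ad [] PySem.Dict.empty

-- ===== PORT B =====
-- B's extract-max loop: take the largest key with positive surviving count, charge
-- its diagonal (-1) and each gcd with the previously chosen answers (-2).
-- The fuel argument is only a totality guard (the Python while-loop has no counter);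
-- the equivalence proof shows `length + 1` iterations always suffice.
def solveAltLoop : Nat → PySem.Dict Int Int → List Int → List Int
  | 0, _, ans => ans
  | fuel + 1, cnt, ans =>
    match PySem.List.max? (cnt.keys.filter (fun v => decide (0 < cnt.getD v 0))) (fun v => v) with
    | none => ans
    | some x =>
      solveAltLoop fuel
        (ans.foldl (fun d j => d.insert (pyGCD x j) (d.getD (pyGCD x j) 0 - 2))
          (cnt.insert x (cnt.getD x 0 - 1)))
        (ans ++ [x])

def solve_alt (A : List Int) : List Int :=
  let Ad := PySem.List.sorted A (fun x => x) true
  let cnt := Ad.foldl (fun d x => d.insert x (d.getD x 0 + 1)) PySem.Dict.empty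
  solveAltLoop (Ad.length + 1) cnt []

-- ===== PRECONDITION & SPEC =====
def Spec_solve (A : List Int) (out : List Int) : Prop := out = solve_alt A
instance (A : List Int) (out : List Int) : Decidable (Spec_solve A out) := by unfold Spec_solve; infer_instance

-- ===== CLAIM (what is proved, stated in full; the proofs are below) =====
def Claim_equal_solve : Prop := ∀ (A : List Int), Dom_solve A → Spec_solve A (solve A)

-- ===== LEMMAS AND PROOFS =====

-- Python's descending sort of ints is the reverse of the ascending sort
lemma sorted_rev_eq_reverse (A : List Int) :
    PySem.List.sorted A (fun x => x) true = (PySem.List.sorted A (fun x => x)).reverse := by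
  apply List.Perm.eq_of_pairwise (le := fun a b : Int => b ≤ a)
  · intro a b _ _ h1 h2; omega
  · exact PySem.List.sorted_pairwise_rev A (fun x => x)
  · rw [List.pairwise_reverse]
    exact PySem.List.sorted_pairwise A (fun x => x)
  · exact ((PySem.List.sorted_perm A (fun x => x) true).trans
      ((PySem.List.sorted_perm A (fun x => x) false).symm.trans (List.reverse_perm _).symm))

lemma swap_aux (l : List Int) (m : Nat) (hm : m ≤ l.length / 2) :
    ((PySem.List.pyRange 0 (m : Int)).foldl (swapStep (l.length : Int)) l).length = l.length ∧
    ∀ k, k < l.length →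
      ((PySem.List.pyRange 0 (m : Int)).foldl (swapStep (l.length : Int)) l).getD k 0 =
        if k < m ∨ l.length - m ≤ k then l.getD (l.length - 1 - k) 0 else l.getD k 0 := by
  induction m with
  | zero =>
    rw [show ((0 : Nat) : Int) = 0 by norm_num, PySem.List.pyRange_one_eq_nil le_rfl]
    refine ⟨rfl, ?_⟩
    intro k hk
    rw [if_neg (by omega)]
    rfl
  | succ m ih =>
    obtain ⟨hlen, hget⟩ := ih (by omega)
    have hL2 : 2 * m + 2 ≤ l.length := by omega
    rw [show ((m + 1 : Nat) : Int) = (m : Int) + 1 by push_cast; ring,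
        PySem.List.pyRange_one_succ_right (by positivity), List.foldl_append,
        List.foldl_cons, List.foldl_nil]
    set r := (PySem.List.pyRange 0 (m : Int)).foldl (swapStep (l.length : Int)) l with hr
    have hcast : (l.length : Int) - 1 - (m : Int) = ((l.length - 1 - m : Nat) : Int) := by omega
    rw [swapStep, hcast, PySem.List.pyGetD_natCast, PySem.List.pyGetD_natCast,
        PySem.List.pySetD_natCast, PySem.List.pySetD_natCast]
    set j2 := l.length - 1 - m with hj2
    have hmj2 : m ≠ j2 := by omega
    have hj2len : j2 < l.length := by omega
    have hmlen : m < l.length := by omega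
    constructor
    · simp [List.length_set, hlen]
    · intro k hk
      have hvm : r.getD m 0 = l.getD m 0 := by
        rw [hget m hmlen, if_neg (by omega)]
      have hvj2 : r.getD j2 0 = l.getD j2 0 := by
        rw [hget j2 hj2len, if_neg (by omega)]
      rw [List.getD_eq_getElem?_getD, List.getElem?_set, List.getElem?_set]
      by_cases hk2 : j2 = k
      · subst hk2
        rw [if_pos rfl, if_pos (by simpa [List.length_set, hlen] using hj2len)]
        simp only [Option.getD_some]
        rw [hvm, if_pos (by omega), show l.length - 1 - j2 = m by omega]
      · rw [if_neg hk2]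
        by_cases hk1 : m = k
        · subst hk1
          rw [if_pos rfl, if_pos (by simpa [hlen] using hmlen)]
          simp only [Option.getD_some]
          rw [hvj2, if_pos (by omega), hj2]
        · rw [if_neg hk1, ← List.getD_eq_getElem?_getD, hget k hk]
          by_cases hc : k < m ∨ l.length - m ≤ k
          · rw [if_pos hc, if_pos (by omega)]
          · rw [if_neg hc, if_neg (by omega)]

lemma swapfold_eq_reverse (l : List Int) :
    (PySem.List.pyRange 0 (PySem.Int.floordiv (PySem.List.len l) 2)).foldl
      (swapStep (PySem.List.len l)) l = l.reverse := by
  have hfd : PySem.Int.floordiv ((l.length : Int)) 2 = ((l.length / 2 : Nat) : Int) := by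
    exact_mod_cast PySem.Int.floordiv_natCast l.length 2
  rw [PySem.List.len_eq, hfd]
  obtain ⟨hL, hG⟩ := swap_aux l (l.length / 2) le_rfl
  apply List.ext_getElem (by rw [hL, List.length_reverse])
  intro k h1 h2
  have hk : k < l.length := hL ▸ h1
  have hgd := hG k hk
  rw [List.getD_eq_getElem _ _ h1] at hgd
  rw [hgd, List.getElem_reverse,
     ← List.getD_eq_getElem l 0 (show l.length - 1 - k < l.length by omega)]
  by_cases hc : k < l.length / 2 ∨ l.length - l.length / 2 ≤ k
  · rw [if_pos hc]
  · rw [if_neg hc, show l.length - 1 - k = k from by omega]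

lemma fold_rel (x : Int) (g : Int → Int) :
    ∀ (ans : List Int) (di cnt : PySem.Dict Int Int),
      (∀ v, cnt.getD v 0 = g v - di.getD v 0) →
      ∀ v, (ans.foldl (fun d j => d.insert (pyGCD x j) (d.getD (pyGCD x j) 0 - 2)) cnt).getD v 0
        = g v - (ans.foldl (fun d j =>
            if d.contains (pyGCD x j) = false then d.insert (pyGCD x j) 2
            else d.insert (pyGCD x j) (d.getD (pyGCD x j) 0 + 2)) di).getD v 0 := by
  intro ans
  induction ans with
  | nil => intro di cnt h v; simpa using h v
  | cons j ans ih =>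
    intro di cnt h v
    simp only [List.foldl_cons]
    apply ih
    intro w
    have h1 := h w
    have h2 := h (pyGCD x j)
    by_cases hc : di.contains (pyGCD x j) = false
    · have h0 : di.getD (pyGCD x j) 0 = 0 := PySem.Dict.getD_of_not_contains di 0 hc
      rw [if_pos hc]
      simp only [PySem.Dict.getD_insert]
      by_cases hw : w = pyGCD x j
      · subst hw; simp; omega
      · simp only [if_neg hw]; omega
    · have hc' : di.contains (pyGCD x j) = true := by simpa using hc
      rw [if_neg hc]
      simp only [PySem.Dict.getD_insert]
      by_cases hw : w = pyGCD x j
      · subst hw; simp; omega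
      · simp only [if_neg hw]; omega

lemma fold_nonneg (x : Int) :
    ∀ (ans : List Int) (di : PySem.Dict Int Int), (∀ v, 0 ≤ di.getD v 0) →
      ∀ v, 0 ≤ ((ans.foldl (fun d j =>
            if d.contains (pyGCD x j) = false then d.insert (pyGCD x j) 2
            else d.insert (pyGCD x j) (d.getD (pyGCD x j) 0 + 2)) di).getD v 0) := by
  intro ans
  induction ans with
  | nil => intro di h v; simpa using h v
  | cons j ans ih =>
    intro di h v
    simp only [List.foldl_cons]
    apply ih
    intro w
    have h1 := h w
    have h2 := h (pyGCD x j)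
    by_cases hc : di.contains (pyGCD x j) = false
    · rw [if_pos hc]
      simp only [PySem.Dict.getD_insert]
      by_cases hw : w = pyGCD x j
      · subst hw; simp
      · simp only [if_neg hw]; omega
    · rw [if_neg hc]
      simp only [PySem.Dict.getD_insert]
      by_cases hw : w = pyGCD x j
      · subst hw; simp; omega
      · simp only [if_neg hw]; omega

lemma max?_eq_of_mem_of_le {l : List Int} {x : Int} (hx : x ∈ l) (hmax : ∀ y ∈ l, y ≤ x) :
    PySem.List.max? l (fun v => v) = some x := by
  cases hm : PySem.List.max? l (fun v => v) with
  | none => rw [PySem.List.max?_eq_none_iff] at hm; subst hm; cases hx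
  | some m =>
    have h1 := PySem.List.max?_isMax hm x hx
    have h2 := hmax m (PySem.List.max?_mem hm)
    have : m = x := le_antisymm h2 h1
    rw [this]


lemma loop_eq :
    ∀ (rest ans : List Int) (di cnt : PySem.Dict Int Int) (fuel : Nat),
      rest.length < fuel →
      cnt.keys.Nodup →
      (∀ v, cnt.getD v 0 = (rest.count v : Int) - di.getD v 0) →
      (∀ v, 0 ≤ di.getD v 0) →
      List.Pairwise (fun a b => b ≤ a) rest →
      solveLoop rest ans di = solveAltLoop fuel cnt ans := by
  intro rest
  induction rest with
  | nil =>
    intro ans di cnt fuel hfuel hnd hrel hnn hpw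
    obtain ⟨f, rfl⟩ : ∃ f, fuel = f + 1 := ⟨fuel - 1, by omega⟩
    have hpos : cnt.keys.filter (fun v => decide (0 < cnt.getD v 0)) = [] := by
      apply List.filter_eq_nil_iff.mpr
      intro v _
      have h1 := hrel v
      have h2 := hnn v
      simp only [List.count_nil, Nat.cast_zero] at h1
      simp only [decide_eq_true_eq]
      omega
    simp [solveLoop, solveAltLoop, hpos, PySem.List.max?]
  | cons x rest ih =>
    intro ans di cnt fuel hfuel hnd hrel hnn hpw
    obtain ⟨f, rfl⟩ : ∃ f, fuel = f + 1 := ⟨fuel - 1, by omega⟩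
    rw [List.pairwise_cons] at hpw
    by_cases hskip : di.contains x = true ∧ 0 < di.getD x 0
    · rw [solveLoop, if_pos hskip]
      apply ih _ _ _ _ (by simp at hfuel ⊢; omega) hnd _ _ hpw.2
      · intro v
        have h1 := hrel v
        have h2 := hrel x
        rw [PySem.Dict.getD_insert]
        by_cases hv : v = x
        · subst hv
          simp only [List.count_cons_self] at h1 ⊢
          push_cast at h1 ⊢
          omega
        · rw [if_neg hv]
          rwa [List.count_cons_of_ne (fun h => hv h.symm)] at h1
      · intro v
        have h1 := hnn v
        have h2 := hnn x
        rw [PySem.Dict.getD_insert]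
        by_cases hv : v = x
        · subst hv; rw [if_pos rfl]; omega
        · rw [if_neg hv]; exact h1
    · -- append case
      have hdix : di.getD x 0 = 0 := by
        by_cases hc : di.contains x = true
        · have := hnn x
          rcases not_and_or.mp hskip with h | h
          · exact absurd hc h
          · omega
        · exact PySem.Dict.getD_of_not_contains di 0 (by simpa using hc)
      have hcntx : cnt.getD x 0 = (List.count x (x :: rest) : Int) := by
        rw [hrel x, hdix]; omega
      have hcntxpos : 0 < cnt.getD x 0 := by
        rw [hcntx]
        exact_mod_cast List.count_pos_iff.mpr (List.mem_cons_self)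
      have hxkeys : x ∈ cnt.keys := by
        by_contra hmem
        have : cnt.contains x = false := by
          rcases Bool.eq_false_or_eq_true (cnt.contains x) with h | h
          · exact absurd ((PySem.Dict.contains_iff_mem_keys cnt x).mp h) hmem
          · exact h
        have := PySem.Dict.getD_of_not_contains cnt (0 : Int) this
        omega
      have hmax : PySem.List.max?
          (cnt.keys.filter (fun v => decide (0 < cnt.getD v 0))) (fun v => v) = some x := by
        apply max?_eq_of_mem_of_le
        · exact List.mem_filter.mpr ⟨hxkeys, by simpa using hcntxpos⟩
        · intro y hy
          rcases List.mem_filter.mp hy with ⟨_, hy2⟩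
          simp only [decide_eq_true_eq] at hy2
          have h1 := hrel y
          have h2 := hnn y
          have hyc : 0 < List.count y (x :: rest) := by omega
          have hymem : y ∈ x :: rest := List.count_pos_iff.mp hyc
          rcases List.mem_cons.mp hymem with h | h
          · exact le_of_eq h
          · exact hpw.1 y h
      rw [solveLoop, if_neg hskip, solveAltLoop]
      simp only [hmax]
      apply ih _ _ _ _ (by simp at hfuel ⊢; omega)
      · -- nodup keys preserved
        exact PySem.Dict.nodup_keys_foldl_insert_key ans (fun j => pyGCD x j)
          (fun d j => d.getD (pyGCD x j) 0 - 2) _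
          (PySem.Dict.nodup_keys_insert cnt x (cnt.getD x 0 - 1) hnd)
      · -- relation preserved
        apply fold_rel x (fun v => (List.count v rest : Int))
        intro v
        rw [PySem.Dict.getD_insert]
        have h1 := hrel v
        by_cases hv : v = x
        · subst hv
          rw [if_pos rfl]
          simp only [List.count_cons_self] at h1
          push_cast at h1 ⊢
          omega
        · rw [if_neg hv]
          rw [List.count_cons_of_ne (fun h => hv h.symm)] at h1
          omega
      · exact fold_nonneg x ans di hnn
      · exact hpw.2


-- ===== VERDICT (by name: the statement is the Claim_ definition above) =====
theorem solve_spec : Claim_equal_solve := by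
  intro A _
  simp only [Spec_solve, solve, solve_alt]
  have hlenAs : PySem.List.len A = PySem.List.len (PySem.List.sorted A (fun x => x)) := by
    rw [PySem.List.len_eq, PySem.List.len_eq, (PySem.List.sorted_perm A (fun x => x) false).length_eq]
  rw [hlenAs, swapfold_eq_reverse, sorted_rev_eq_reverse,
      PySem.Dict.foldl_insert_getD_add_one_eq_counter]
  apply loop_eq
  · omega
  · exact PySem.Dict.nodup_keys_counter _
  · intro v
    rw [PySem.Dict.getD_counter, PySem.Dict.getD_empty]
    omega
  · intro v
    rw [PySem.Dict.getD_empty]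
  · rw [List.pairwise_reverse]
    exact PySem.List.sorted_pairwise A (fun x => x)
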